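-- pv_equiv track=rewrite | github.com/blackhat-7/randomCodes | python/gfg/permSumEven.py | permlen
-- ===== SOURCE A (Python) =====
-- def permlen(low, high, k):
--     even = sum(1 for x in range(low,high+1) if x&1 == 0)
--     odd = sum(1 for x in range(low,high+1) if x&1 != 0)
--
--     even_total = odd_total = 0
--     even_prev = 1
--     odd_prev = 0
--     for _ in range(k):
--         even_total = even*even_prev + odd*odd_prev
--         odd_total = odd*even_prev + even*odd_prev
--         odd_prev = odd_total
--         even_prev = even_total
--     return even_total
-- ===== SOURCE B (Python) =====
-- def permlen(low, high, k):
--     # Closed form: with s = even+odd = n and d = even-odd, the loop state satisfies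
--     # even_prev = (s**i + d**i)//2 after i steps, so the answer is (n**k + d**k)//2 for k >= 1.
--     if k <= 0:
--         return 0
--     n = high - low + 1
--     if n <= 0:
--         return 0
--     even = high // 2 - (low - 1) // 2
--     d = 2 * even - n
--     return (n ** k + d ** k) // 2
-- ===== Notes on version B (the rewrite author's own statement) =====
-- stated objective: faster
-- what changed: Replaces the O(high-low) parity-counting scan and the O(k) linear-recurrence loop by closed-form even/odd counts (floor divisions) and the eigenvalue closed form (n**k + (even-odd)**k)//2 via fast exponentiation; intended as faster, measured 249x at the largest size both finished (A timed out elsewhere).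
import Mathlib
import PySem

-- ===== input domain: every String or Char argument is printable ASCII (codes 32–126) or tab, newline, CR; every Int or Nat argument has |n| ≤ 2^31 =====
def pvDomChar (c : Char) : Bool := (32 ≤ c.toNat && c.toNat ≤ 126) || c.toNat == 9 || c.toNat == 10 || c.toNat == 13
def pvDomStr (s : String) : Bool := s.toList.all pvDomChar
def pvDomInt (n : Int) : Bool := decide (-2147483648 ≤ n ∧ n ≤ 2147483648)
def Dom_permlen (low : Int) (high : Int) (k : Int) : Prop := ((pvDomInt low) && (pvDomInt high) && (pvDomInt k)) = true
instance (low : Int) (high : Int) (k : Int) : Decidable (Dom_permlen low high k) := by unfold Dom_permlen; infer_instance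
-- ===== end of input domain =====

-- B replaces A's counting loop and linear recurrence by closed-form parity counts and the
-- eigenvalue closed form (n^k + d^k)/2; intended as faster (measured 249x at the largest
-- size both Pythons finished; A timed out on the other large inputs).

-- ===== PORT A =====
-- Python `x & 1` equals `x % 2` (floor mod, positive divisor): ported exactly as PySem.Int.mod x 2.
def permlen (low : Int) (high : Int) (k : Int) : Int :=
  let even : Int := (PySem.List.pyRange low (high + 1) 1).foldl
    (fun acc x => if PySem.Int.mod x 2 == 0 then acc + 1 else acc) 0
  let odd : Int := (PySem.List.pyRange low (high + 1) 1).foldl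
    (fun acc x => if PySem.Int.mod x 2 != 0 then acc + 1 else acc) 0
  let st := (PySem.List.pyRange 0 k 1).foldl
    (fun (s : Int × Int × Int × Int) _ =>
      let even_total := even * s.2.2.1 + odd * s.2.2.2
      let odd_total := odd * s.2.2.1 + even * s.2.2.2
      (even_total, odd_total, even_total, odd_total))
    (0, 0, 1, 0)
  st.1

-- ===== PORT B =====
def permlen_alt (low : Int) (high : Int) (k : Int) : Int :=
  if k ≤ 0 then 0
  else
    let n := high - low + 1
    if n ≤ 0 then 0
    else
      let even := PySem.Int.floordiv high 2 - PySem.Int.floordiv (low - 1) 2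
      let d := 2 * even - n
      PySem.Int.floordiv (n ^ k.toNat + d ^ k.toNat) 2

-- ===== PRECONDITION & SPEC =====
def Spec_permlen (low : Int) (high : Int) (k : Int) (out : Int) : Prop := out = permlen_alt low high k
instance (low : Int) (high : Int) (k : Int) (out : Int) : Decidable (Spec_permlen low high k out) := by unfold Spec_permlen; infer_instance

-- ===== CLAIM (what is proved, stated in full; the proofs are below) =====
def Claim_equal_permlen : Prop := ∀ (low : Int) (high : Int) (k : Int), Dom_permlen low high k → Spec_permlen low high k (permlen low high k)

-- ===== LEMMAS AND PROOFS =====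

-- step function of A's recurrence loop, abstracted over the two counts
def pvStep (e o : Int) (s : Int × Int × Int × Int) : Int × Int × Int × Int :=
  let et := e * s.2.2.1 + o * s.2.2.2
  let ot := o * s.2.2.1 + e * s.2.2.2
  (et, ot, et, ot)

theorem pv_foldl_const {α β : Type} (f : β → β) :
    ∀ (l : List α) (init : β), l.foldl (fun s _ => f s) init = f^[l.length] init := by
  intro l
  induction l with
  | nil => intro init; simp
  | cons a t ih =>
      intro init
      simp [List.foldl, ih, Function.iterate_succ_apply]

theorem pv_evens_fold : ∀ (m : Nat) (a b acc : Int), (b - a).toNat = m →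
    (PySem.List.pyRange a b 1).foldl
      (fun acc x => if PySem.Int.mod x 2 == 0 then acc + 1 else acc) acc
    = acc + (if a < b then (b - 1) / 2 - (a - 1) / 2 else 0) := by
  intro m
  induction m with
  | zero =>
      intro a b acc h
      have hba : b ≤ a := by omega
      rw [PySem.List.pyRange_one_eq_nil hba]
      simp; omega
  | succ m ih =>
      intro a b acc h
      have hab : a < b := by omega
      rw [PySem.List.pyRange_one_cons hab]
      rw [List.foldl_cons]
      rw [ih (a + 1) b _ (by omega)]
      rw [PySem.Int.mod_eq_emod_of_pos (by norm_num : (0:Int) < 2)]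
      by_cases hp : a % 2 = 0
      · simp only [hp]; simp; split_ifs <;> omega
      · have : ¬ ((a % 2 == 0) = true) := by simpa using hp
        simp only [if_neg this]; split_ifs <;> omega

theorem pv_odds_fold : ∀ (m : Nat) (a b acc : Int), (b - a).toNat = m →
    (PySem.List.pyRange a b 1).foldl
      (fun acc x => if PySem.Int.mod x 2 != 0 then acc + 1 else acc) acc
    = acc + (if a < b then (b - a) - ((b - 1) / 2 - (a - 1) / 2) else 0) := by
  intro m
  induction m with
  | zero =>
      intro a b acc h
      have hba : b ≤ a := by omega
      rw [PySem.List.pyRange_one_eq_nil hba]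
      simp
      omega
  | succ m ih =>
      intro a b acc h
      have hab : a < b := by omega
      rw [PySem.List.pyRange_one_cons hab]
      rw [List.foldl_cons]
      rw [ih (a + 1) b _ (by omega)]
      rw [PySem.Int.mod_eq_emod_of_pos (by norm_num : (0:Int) < 2)]
      by_cases hp : a % 2 = 0
      · have : ((a % 2 != 0) = true) = False := by simp [hp]
        simp only [this, if_false]; split_ifs <;> omega
      · have : ((a % 2 != 0) = true) = True := by simp; omega
        simp only [this, if_true]; split_ifs <;> omega

theorem pv_iter_inv (e o : Int) : ∀ (m : Nat),
    ((pvStep e o)^[m] ((0:Int), (0:Int), (1:Int), (0:Int))).2.2.1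
      + ((pvStep e o)^[m] ((0:Int), (0:Int), (1:Int), (0:Int))).2.2.2 = (e + o) ^ m
    ∧ ((pvStep e o)^[m] ((0:Int), (0:Int), (1:Int), (0:Int))).2.2.1
      - ((pvStep e o)^[m] ((0:Int), (0:Int), (1:Int), (0:Int))).2.2.2 = (e - o) ^ m
    ∧ (m ≠ 0 → ((pvStep e o)^[m] ((0:Int), (0:Int), (1:Int), (0:Int))).1
        = ((pvStep e o)^[m] ((0:Int), (0:Int), (1:Int), (0:Int))).2.2.1) := by
  intro m
  induction m with
  | zero => simp
  | succ m ih =>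
      obtain ⟨h1, h2, _⟩ := ih
      rw [Function.iterate_succ_apply']
      set s := (pvStep e o)^[m] ((0:Int), (0:Int), (1:Int), (0:Int)) with hs
      refine ⟨?_, ?_, fun _ => rfl⟩
      · show (e * s.2.2.1 + o * s.2.2.2) + (o * s.2.2.1 + e * s.2.2.2) = (e + o) ^ (m + 1)
        rw [pow_succ]
        calc (e * s.2.2.1 + o * s.2.2.2) + (o * s.2.2.1 + e * s.2.2.2)
            = (e + o) * (s.2.2.1 + s.2.2.2) := by ring
          _ = (e + o) ^ m * (e + o) := by rw [h1]; ring
      · show (e * s.2.2.1 + o * s.2.2.2) - (o * s.2.2.1 + e * s.2.2.2) = (e - o) ^ (m + 1)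
        rw [pow_succ]
        calc (e * s.2.2.1 + o * s.2.2.2) - (o * s.2.2.1 + e * s.2.2.2)
            = (e - o) * (s.2.2.1 - s.2.2.2) := by ring
          _ = (e - o) ^ m * (e - o) := by rw [h2]; ring

-- ===== VERDICT (by name: the statement is the Claim_ definition above) =====
theorem permlen_spec : Claim_equal_permlen := by
  intro low high k _
  unfold Spec_permlen permlen permlen_alt
  simp only []
  rw [pv_evens_fold (high + 1 - low).toNat low (high + 1) 0 rfl,
      pv_odds_fold (high + 1 - low).toNat low (high + 1) 0 rfl]
  set E := (0:Int) + (if low < high + 1 then (high + 1 - 1) / 2 - (low - 1) / 2 else 0) with hE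
  set O := (0:Int) + (if low < high + 1 then (high + 1 - low) - ((high + 1 - 1) / 2 - (low - 1) / 2) else 0) with hO
  have hstep : (fun (s : Int × Int × Int × Int) (_ : Int) =>
      (E * s.2.2.1 + O * s.2.2.2, O * s.2.2.1 + E * s.2.2.2,
       E * s.2.2.1 + O * s.2.2.2, O * s.2.2.1 + E * s.2.2.2))
      = fun (s : Int × Int × Int × Int) (_ : Int) => pvStep E O s := rfl
  rw [hstep, pv_foldl_const (pvStep E O)]
  rw [PySem.List.length_pyRange_one]
  by_cases hk : k ≤ 0
  · have h0 : (k - 0).toNat = 0 := by omega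
    rw [h0]
    simp [hk]
  · have hm : (k - 0).toNat ≠ 0 := by omega
    obtain ⟨h1, h2, h3⟩ := pv_iter_inv E O (k - 0).toNat
    rw [h3 hm]
    rw [if_neg hk]
    rw [PySem.Int.floordiv_eq_ediv_of_pos (a := high) (by norm_num : (0:Int) < 2),
        PySem.Int.floordiv_eq_ediv_of_pos (a := low - 1) (by norm_num : (0:Int) < 2)]
    have hkk : (k - 0).toNat = k.toNat := by omega
    rw [hkk] at h1 h2 ⊢
    by_cases hn : high - low + 1 ≤ 0
    · rw [if_pos hn]
      have hlt : ¬ (low < high + 1) := by omega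
      have hE0 : E = 0 := by rw [hE, if_neg hlt]; ring
      have hO0 : O = 0 := by rw [hO, if_neg hlt]; ring
      rw [hE0, hO0] at h1 h2 ⊢
      have hz : ((0:Int) + 0) ^ k.toNat = 0 := by
        rw [zero_add]; exact zero_pow (by omega)
      have hz2 : ((0:Int) - 0) ^ k.toNat = 0 := by
        rw [sub_zero]; exact zero_pow (by omega)
      omega
    · rw [if_neg hn]
      rw [PySem.Int.floordiv_eq_ediv_of_pos (by norm_num : (0:Int) < 2)]
      have hlt : low < high + 1 := by omega
      have hEv : E = high / 2 - (low - 1) / 2 := by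
        have hh : high + 1 - 1 = high := by ring
        rw [hE, if_pos hlt, hh]; ring
      have hOv : O = high + 1 - low - (high / 2 - (low - 1) / 2) := by
        have hh : high + 1 - 1 = high := by ring
        rw [hO, if_pos hlt, hh]; ring
      rw [hEv, hOv] at h1 h2 ⊢
      have e1 : (high / 2 - (low - 1) / 2) + (high + 1 - low - (high / 2 - (low - 1) / 2))
          = high - low + 1 := by ring
      have e2 : (high / 2 - (low - 1) / 2) - (high + 1 - low - (high / 2 - (low - 1) / 2))
          = 2 * (high / 2 - (low - 1) / 2) - (high - low + 1) := by ring
      rw [e1] at h1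
      rw [e2] at h2
      omega
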